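-- pv_equiv track=rewrite | github.com/SecurityUniversalOrg/SecuSphere | src/vr/orchestration/web/cicd_pipelines.py | generate_env_str
-- ===== SOURCE A (Python) =====
-- def generate_env_str(stages):
--     # env_str = "environment {\n        SNYK_API_KEY = credentials('snyk-api-key')\n    }"
--     env_str = "environment {\n"
--     init = False
--     for i in stages:
--         if i == 'Software Composition Analysis':
--             if not init:
--                 init = True
--             env_str += f"        SNYK_API_KEY = credentials('snyk-api-key')\n"
--     if init:
--         env_str += "    }"
--     else:
--         env_str = ""
--     return env_str
-- ===== SOURCE B (Python) =====
-- def generate_env_str(stages):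
--     n = sum(1 for i in stages if i == 'Software Composition Analysis')
--     if n == 0:
--         return ""
--     return "environment {\n" + "        SNYK_API_KEY = credentials('snyk-api-key')\n" * n + "    }"
-- ===== Notes on version B (the rewrite author's own statement) =====
-- stated objective: simpler
-- what changed: Counts matching stages in one aggregating pass and builds the result by string repetition, instead of A's loop with incremental append and an init flag.
import Mathlib
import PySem

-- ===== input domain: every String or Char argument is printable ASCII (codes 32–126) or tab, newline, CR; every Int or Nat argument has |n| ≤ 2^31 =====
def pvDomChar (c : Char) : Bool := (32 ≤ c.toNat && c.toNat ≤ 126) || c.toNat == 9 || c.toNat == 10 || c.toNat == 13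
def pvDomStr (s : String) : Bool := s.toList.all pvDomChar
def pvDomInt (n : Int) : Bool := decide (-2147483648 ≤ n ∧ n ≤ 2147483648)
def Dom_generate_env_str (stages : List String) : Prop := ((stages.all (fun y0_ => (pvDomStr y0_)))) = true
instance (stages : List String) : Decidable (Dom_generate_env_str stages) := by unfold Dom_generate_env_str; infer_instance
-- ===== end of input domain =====

-- B counts matching stages in one aggregating pass and builds the result by string repetition,
-- instead of A's incremental append with an init flag (objective: simpler).


-- ===== PORT A =====
def generate_env_str (stages : List String) : String :=
  let st := stages.foldl (fun (acc : String × Bool) i =>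
    if i == "Software Composition Analysis" then
      (acc.1 ++ "        SNYK_API_KEY = credentials('snyk-api-key')\n",
       if !acc.2 then true else acc.2)
    else acc) ("environment {\n", false)
  if st.2 then st.1 ++ "    }" else ""

-- ===== PORT B =====
def generate_env_str_alt (stages : List String) : String :=
  let n := stages.countP (fun i => i == "Software Composition Analysis")
  if n = 0 then ""
  else "environment {\n" ++ String.join (List.replicate n "        SNYK_API_KEY = credentials('snyk-api-key')\n") ++ "    }"

-- ===== PRECONDITION & SPEC =====
def Spec_generate_env_str (stages : List String) (out : String) : Prop := out = generate_env_str_alt stages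
instance (stages : List String) (out : String) : Decidable (Spec_generate_env_str stages out) := by unfold Spec_generate_env_str; infer_instance

-- ===== CLAIM (what is proved, stated in full; the proofs are below) =====
def Claim_equal_generate_env_str : Prop := ∀ (stages : List String), Dom_generate_env_str stages → Spec_generate_env_str stages (generate_env_str stages)

-- ===== LEMMAS AND PROOFS =====

theorem foldl_str_append_init (l : List String) (x y : String) :
    List.foldl (fun r s => r ++ s) (x ++ y) l = x ++ List.foldl (fun r s => r ++ s) y l := by
  induction l generalizing y with
  | nil => simp
  | cons h t ih => simp [List.foldl_cons, String.append_assoc, ih]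

theorem gen_foldl_char (stages : List String) (s : String) (b : Bool) :
    stages.foldl (fun (acc : String × Bool) i =>
      if i == "Software Composition Analysis" then
        (acc.1 ++ "        SNYK_API_KEY = credentials('snyk-api-key')\n",
         if !acc.2 then true else acc.2)
      else acc) (s, b)
    = (s ++ String.join (List.replicate (stages.countP (fun i => i == "Software Composition Analysis")) "        SNYK_API_KEY = credentials('snyk-api-key')\n"),
       b || decide (0 < stages.countP (fun i => i == "Software Composition Analysis"))) := by
  induction stages generalizing s b with
  | nil => simp [String.join]
  | cons h t ih =>
    by_cases hh : h == "Software Composition Analysis"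
    · simp only [List.foldl_cons, if_pos, List.countP_cons, hh, ih]
      refine Prod.ext ?_ ?_
      · simp only [List.replicate_succ, String.join, List.foldl_cons]
        rw [show ("" : String) ++ "        SNYK_API_KEY = credentials('snyk-api-key')\n" = "        SNYK_API_KEY = credentials('snyk-api-key')\n" ++ "" by simp]
        rw [foldl_str_append_init]
        simp [String.append_assoc]
      · cases b <;> simp
    · simp only [List.foldl_cons, List.countP_cons]
      rw [if_neg (by simpa using hh), ih]
      simp [hh]

-- ===== VERDICT (by name: the statement is the Claim_ definition above) =====
theorem generate_env_str_spec : Claim_equal_generate_env_str := by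
  intro stages _
  unfold Spec_generate_env_str generate_env_str generate_env_str_alt
  simp only [gen_foldl_char]
  by_cases h : stages.countP (fun i => i == "Software Composition Analysis") = 0
  · simp [h]
  · simp [h, Nat.pos_of_ne_zero h]
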